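-- pv_equiv track=rewrite | github.com/Kmirek3110/Studia | Rok1/Python/Lista11/zadanie4.py | permutacja
-- ===== SOURCE A (Python) =====
-- def permutacja(s):
--     w={}
--     l=[]
--     j=1
--     so=''
--     for i in range(len(s)):
--         if(s[i] not in l):
--             w[s[i]]=j
--             j+=1
--             l.append(s[i])
--             if(i!=len(s)-1):
--                 so+=str(w[s[i]])+'-'
--             else:
--                 so+=str(w[s[i]])
--         else:
--             if(i!=len(s)-1):
--                 so+=str(w[s[i]])+'-'
--             else:
--                 so+=str(w[s[i]])
--     return so
-- ===== SOURCE B (Python) =====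
-- def permutacja(s):
--     # Two passes: build the first-occurrence label table, then map-and-join.
--     w = {}
--     j = 1
--     for c in s:
--         if c not in w:
--             w[c] = j
--             j += 1
--     return '-'.join(str(w[c]) for c in s)
-- ===== Notes on version B (the rewrite author's own statement) =====
-- stated objective: simpler
-- what changed: Replaces A's single interleaved scan (building the label dict, a parallel seen-list with a linear membership scan, and the dash-separated output string with an explicit last-index guard) by two clean passes: build the first-occurrence label dict alone, then join a map over the string; the seen-list and the last-index guard disappear.
import Mathlib
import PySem

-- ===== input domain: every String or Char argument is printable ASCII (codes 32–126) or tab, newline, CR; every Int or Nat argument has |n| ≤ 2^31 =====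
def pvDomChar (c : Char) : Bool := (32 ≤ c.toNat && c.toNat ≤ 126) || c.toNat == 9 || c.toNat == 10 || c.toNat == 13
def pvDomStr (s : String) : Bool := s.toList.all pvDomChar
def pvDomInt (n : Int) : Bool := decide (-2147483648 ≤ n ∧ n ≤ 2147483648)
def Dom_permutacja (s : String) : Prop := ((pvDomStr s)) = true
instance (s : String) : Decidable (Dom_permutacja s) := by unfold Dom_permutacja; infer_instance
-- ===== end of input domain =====

-- B replaces A's single interleaved scan (dict + seen-list + manual dash-guarded string building)
-- with two clean passes: build the first-occurrence label dict, then '-'.join a map over s (simpler).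

-- ===== PORT A =====
-- A's loop over range(len(s)): state (w, l, j, so); the guard 'i != len(s)-1' is 'rest ≠ []'.
-- 'w[s[i]]' always has the key (just inserted or previously seen), so 'getD _ 0' never takes the default.
def pvALoop (w : PySem.Dict Char Int) (l : List Char) (j : Int) (so : List Char) :
    List Char → List Char
  | [] => so
  | c :: rest =>
    if l.contains c = false then
      let w' := w.insert c j
      let so' := if rest ≠ [] then so ++ PySem.Int.toChars (w'.getD c 0) ++ ['-']
                 else so ++ PySem.Int.toChars (w'.getD c 0)
      pvALoop w' (l ++ [c]) (j + 1) so' rest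
    else
      let so' := if rest ≠ [] then so ++ PySem.Int.toChars (w.getD c 0) ++ ['-']
                 else so ++ PySem.Int.toChars (w.getD c 0)
      pvALoop w l j so' rest

def permutacja (s : String) : String :=
  String.ofList (pvALoop PySem.Dict.empty [] 1 [] s.toList)

-- ===== PORT B =====
-- first pass: build the first-occurrence label dict
def pvBuild (w : PySem.Dict Char Int) (j : Int) : List Char → PySem.Dict Char Int
  | [] => w
  | c :: rest =>
    if w.contains c = false then pvBuild (w.insert c j) (j + 1) rest
    else pvBuild w j rest

-- second pass: '-'.join(str(w[c]) for c in s)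
def permutacja_alt (s : String) : String :=
  let w := pvBuild PySem.Dict.empty 1 s.toList
  String.ofList (PySem.Chars.join ['-'] (s.toList.map fun c => PySem.Int.toChars (w.getD c 0)))

-- ===== PRECONDITION & SPEC =====
def Spec_permutacja (s : String) (out : String) : Prop := out = permutacja_alt s
instance (s : String) (out : String) : Decidable (Spec_permutacja s out) := by unfold Spec_permutacja; infer_instance

-- ===== CLAIM (what is proved, stated in full; the proofs are below) =====
def Claim_equal_permutacja : Prop := ∀ (s : String), Dom_permutacja s → Spec_permutacja s (permutacja s)

-- ===== LEMMAS AND PROOFS =====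

-- pvBuild only adds new keys: bindings already present are untouched.
lemma pvBuild_getD_stable (rest : List Char) (w : PySem.Dict Char Int) (j : Int) (c : Char)
    (hc : w.contains c = true) : (pvBuild w j rest).getD c 0 = w.getD c 0 := by
  induction rest generalizing w j with
  | nil => rfl
  | cons x xs ih =>
    simp only [pvBuild]
    split
    · rename_i hx
      have hne : c ≠ x := by rintro rfl; rw [hc] at hx; cases hx
      rw [ih _ _ (by simp [PySem.Dict.contains_insert, hc]),
        PySem.Dict.getD_insert_of_ne _ _ _ hne]
    · exact ih _ _ hc

-- main loop invariant: A's interleaved scan produces 'so' followed by the dash-join of the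
-- remaining labels read off the final dict.
lemma pvALoop_eq (rest : List Char) (w : PySem.Dict Char Int) (l : List Char) (j : Int)
    (so : List Char) (hinv : ∀ c, l.contains c = w.contains c) :
    pvALoop w l j so rest =
      so ++ PySem.Chars.join ['-']
        (rest.map fun c => PySem.Int.toChars ((pvBuild w j rest).getD c 0)) := by
  induction rest generalizing w l j so with
  | nil => simp [pvALoop, PySem.Chars.join_nil]
  | cons c cs ih =>
    simp only [pvALoop, pvBuild, hinv c]
    split
    · rename_i hc
      have hcc : (w.insert c j).contains c = true := PySem.Dict.contains_insert_self _ _ _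
      have hhead : (pvBuild (w.insert c j) (j + 1) cs).getD c 0 = j := by
        rw [pvBuild_getD_stable _ _ _ _ hcc, PySem.Dict.getD_insert_self]
      rw [ih (w.insert c j) (l ++ [c]) (j + 1) _
        (by intro x; by_cases hxc : x = c
            · simp [hxc]
            · simp [PySem.Dict.contains_insert, hxc, ← hinv x])]
      cases cs with
      | nil => simp [PySem.Chars.join_singleton, hhead, PySem.Dict.getD_insert_self]
      | cons d ds =>
        simp only [List.map_cons, PySem.Chars.join_cons_cons, hhead,
          PySem.Dict.getD_insert_self, ne_eq, not_false_iff, if_pos,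
          List.cons_ne_nil, List.append_assoc]
    · rename_i hc
      have hcw : w.contains c = true := by simpa using hc
      have hhead : (pvBuild w j cs).getD c 0 = w.getD c 0 := pvBuild_getD_stable _ _ _ _ hcw
      rw [ih w l j _ hinv]
      cases cs with
      | nil => simp [PySem.Chars.join_singleton, hhead]
      | cons d ds =>
        simp [PySem.Chars.join_cons_cons, hhead]

-- ===== VERDICT (by name: the statement is the Claim_ definition above) =====
theorem permutacja_spec : Claim_equal_permutacja := by
  intro s _
  unfold Spec_permutacja permutacja permutacja_alt
  rw [pvALoop_eq s.toList PySem.Dict.empty [] 1 [] (by intro c; simp)]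
  simp
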